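-- pv_equiv track=rewrite | github.com/kprahman/py_book_exercises | ch14/queens_final.py | rotate
-- ===== SOURCE A (Python) =====
-- def rotate(bd, times):
--     counter = 0
--     while counter < times:
--         yl = []
--         xl = []
--         newx = []
--         combine = []
--         final_list = []
--         for (x,y) in enumerate(bd):
--             yl.append(y)
--             xl.append(x)
--
--         for i in yl:
--             newx.append(i)
--         xl.reverse()
--
--         for i,v in enumerate(newx):
--             pair = [v,xl[i]]
--             combine.append(pair)
--         combine.sort()
--
--         for i in combine:
--             final_list.append(i[1])
--         counter += 1
--         bd = final_list
--     return final_list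
-- ===== SOURCE B (Python) =====
-- def rotate(bd, times):
--     # One 90-degree rotation: pair each value with its mirrored index, sort, take indices.
--     def rot(b):
--         n = len(b)
--         return [x for _, x in sorted((v, n - 1 - i) for i, v in enumerate(b))]
--     # After the first rotation the board is a permutation of range(n), on which
--     # rotation has period 4: only 1 + (times-1) % 4 rotations are ever needed.
--     b = rot(bd)
--     for _ in range((times - 1) % 4):
--         b = rot(b)
--     return b
-- ===== Notes on version B (the rewrite author's own statement) =====
-- stated objective: faster
-- what changed: B performs only 1 + (times-1) % 4 rotations instead of A's 'times' rotations, using the fact that after the first rotation the board is a permutation of range(n) on which a 90-degree rotation has period 4; each rotation is a single comprehension over sorted mirrored pairs instead of A's five accumulator loops.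
import Mathlib
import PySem

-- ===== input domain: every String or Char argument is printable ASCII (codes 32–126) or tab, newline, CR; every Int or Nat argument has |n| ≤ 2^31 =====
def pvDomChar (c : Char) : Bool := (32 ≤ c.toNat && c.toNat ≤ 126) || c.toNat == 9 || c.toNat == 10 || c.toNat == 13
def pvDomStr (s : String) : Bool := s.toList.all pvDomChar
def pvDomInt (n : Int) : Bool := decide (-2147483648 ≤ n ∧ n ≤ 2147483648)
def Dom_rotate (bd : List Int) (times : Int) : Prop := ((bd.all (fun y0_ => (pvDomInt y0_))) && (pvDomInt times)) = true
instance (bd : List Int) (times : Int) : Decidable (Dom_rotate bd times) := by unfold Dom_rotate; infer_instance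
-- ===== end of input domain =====

-- B replaces A's 'times'-iteration loop by at most four rotations (period 4 after the first
-- rotation) and each rotation's five accumulator loops by one sorted-comprehension: faster.


-- ===== PORT A =====
-- one pass of A's while-loop body: the five append loops, xl.reverse, combine.sort()
def rotateStepA (bd : List Int) : List Int :=
  let ylxl := (PySem.List.enumerate bd 0).foldl
      (fun (s : List Int × List Int) p => (s.1 ++ [p.2], s.2 ++ [p.1])) ([], [])
  let yl := ylxl.1
  let xl := ylxl.2
  let newx := yl.foldl (fun acc i => acc ++ [i]) []
  let xlr := xl.reverse
  let combine := (PySem.List.enumerate newx 0).foldl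
      (fun (acc : List (Int × Int)) p => acc ++ [(p.2, PySem.List.pyGetD xlr p.1 0)]) []
  let sortedc := PySem.List.sorted2 combine Prod.fst Prod.snd
  sortedc.foldl (fun (acc : List Int) p => acc ++ [p.2]) []

-- the while-loop: one recursive call per counter increment; bd := final_list each round
def rotateGoA : Nat → List Int → List Int
  | 0, bd => bd
  | n+1, bd => rotateGoA n (rotateStepA bd)

def rotate (bd : List Int) (times : Int) : List Int :=
  -- for times <= 0 Python's final_list is unbound (UnboundLocalError): excluded by Pre_
  if times ≤ 0 then [] else rotateGoA times.toNat bd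

-- ===== PORT B =====
-- Source B's rot: pair each value with its mirrored index, sort, take indices
def rotB (b : List Int) : List Int :=
  let n : Int := (b.length : Int)
  (PySem.List.sorted2 ((PySem.List.enumerate b 0).map (fun p => (p.2, n - 1 - p.1)))
      Prod.fst Prod.snd).map (fun p => p.2)

def rotate_alt (bd : List Int) (times : Int) : List Int :=
  let b := rotB bd
  (PySem.List.pyRange 0 (PySem.Int.mod (times - 1) 4) 1).foldl (fun acc _ => rotB acc) b

-- ===== PRECONDITION & SPEC =====
-- Pre_ excludes times ≤ 0, where A's 'while' body never runs and A raises UnboundLocalError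
def Pre_rotate (bd : List Int) (times : Int) : Prop := 1 ≤ times
instance (bd : List Int) (times : Int) : Decidable (Pre_rotate bd times) := by
  unfold Pre_rotate; infer_instance
def pvWitness_rotate : List Int × Int := ([0, 2, 1], 2)

def Spec_rotate (bd : List Int) (times : Int) (out : List Int) : Prop := out = rotate_alt bd times
instance (bd : List Int) (times : Int) (out : List Int) : Decidable (Spec_rotate bd times out) := by
  unfold Spec_rotate; infer_instance

-- ===== CLAIM (what is proved, stated in full; the proofs are below) =====
def Claim_equal_rotate : Prop := ∀ (bd : List Int) (times : Int), Dom_rotate bd times →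
  Pre_rotate bd times → Spec_rotate bd times (rotate bd times)

-- ===== LEMMAS AND PROOFS =====

-- the Boolean lexicographic 'before' that sorted2 … Prod.fst Prod.snd uses
def bef (a b : Int × Int) : Bool :=
  decide (a.1 < b.1) || (!decide (b.1 < a.1) && decide (a.2 < b.2))

theorem bef_iff (a b : Int × Int) : bef a b = true ↔ (a.1 < b.1 ∨ (a.1 = b.1 ∧ a.2 < b.2)) := by
  simp [bef]; omega

theorem bef_asymm {a b : Int × Int} (h : bef a b = true) : bef b a = false := by
  simp only [bef_iff] at h
  simp only [bef, Bool.or_eq_false_iff, Bool.and_eq_false_iff, Bool.not_eq_false',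
    decide_eq_true_eq, decide_eq_false_iff_not]
  omega

theorem bef_trans {a b c : Int × Int} (h1 : bef a b = true) (h2 : bef b c = true) :
    bef a c = true := by
  simp only [bef_iff] at *; omega

theorem bef_antisymm {a b : Int × Int} (h1 : bef a b = false) (h2 : bef b a = false) : a = b := by
  simp only [bef, Bool.or_eq_false_iff, Bool.and_eq_false_iff, Bool.not_eq_false',
    decide_eq_true_eq, decide_eq_false_iff_not] at h1 h2
  have : a.1 = b.1 ∧ a.2 = b.2 := by omega
  exact Prod.ext this.1 this.2

theorem pairwise_insertBy (x : Int × Int) (acc : List (Int × Int))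
    (h : acc.Pairwise (fun a b => bef b a = false)) :
    (PySem.List.insertBy bef x acc).Pairwise (fun a b => bef b a = false) := by
  induction acc with
  | nil =>
      simp only [PySem.List.insertBy]
      exact List.pairwise_singleton _ _
  | cons y ys ih =>
      obtain ⟨hy, hys⟩ := List.pairwise_cons.mp h
      rw [PySem.List.insertBy]
      by_cases hxy : bef x y = true
      · rw [if_pos hxy]
        refine List.pairwise_cons.mpr ⟨?_, h⟩
        intro z hz
        rcases List.mem_cons.mp hz with rfl | hz'
        · exact bef_asymm hxy
        · by_contra hne
          have hzx : bef z x = true := by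
            cases hb : bef z x with
            | true => rfl
            | false => exact absurd hb hne
          have : bef z y = true := bef_trans hzx hxy
          rw [hy z hz'] at this; exact Bool.false_ne_true this
      · rw [if_neg hxy]
        refine List.pairwise_cons.mpr ⟨?_, ih hys⟩
        intro z hz
        rcases (PySem.List.mem_insertBy bef x z ys).mp hz with rfl | hz'
        · exact (Bool.not_eq_true _).mp hxy
        · exact hy z hz'

theorem pairwise_foldl_insertBy (xs acc : List (Int × Int))
    (h : acc.Pairwise (fun a b => bef b a = false)) :
    (xs.foldl (fun acc x => PySem.List.insertBy bef x acc) acc).Pairwise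
      (fun a b => bef b a = false) := by
  induction xs generalizing acc with
  | nil => exact h
  | cons y ys ih => exact ih _ (pairwise_insertBy y acc h)

theorem sorted2_fst_snd_eq (xs ys : List (Int × Int)) (hperm : ys.Perm xs)
    (hp : ys.Pairwise (fun a b => bef a b = true)) :
    PySem.List.sorted2 xs Prod.fst Prod.snd false = ys := by
  have hz : PySem.List.sorted2 xs Prod.fst Prod.snd false
      = xs.foldl (fun acc x => PySem.List.insertBy bef x acc) [] := rfl
  refine List.eq_of_perm_of_sorted (le := fun a b => bef b a = false)
    (fun a b _ _ h1 h2 => bef_antisymm h2 h1) ?_ ?_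
    ((PySem.List.sorted2_perm xs Prod.fst Prod.snd false).trans hperm.symm)
  · rw [hz]; exact pairwise_foldl_insertBy xs [] List.Pairwise.nil
  · exact hp.imp (fun h => bef_asymm h)

theorem enum_eq (b : List Int) (s : Int) :
    PySem.List.enumerate b s = (List.range b.length).map (fun i : Nat => (s + (i : Int), b.getD i 0)) := by
  induction b generalizing s with
  | nil => simp [PySem.List.enumerate_nil]
  | cons x xs ih =>
      rw [PySem.List.enumerate_cons, ih (s + 1)]
      simp only [List.length_cons, List.range_succ_eq_map, List.map_cons, List.map_map]
      refine List.cons_eq_cons.mpr ⟨by simp, ?_⟩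
      refine List.map_congr_left (fun i _ => ?_)
      simp
      ring

def mir (n : Nat) (x : Int) : Int := (n : Int) - 1 - x

def rangeI (n : Nat) : List Int := List.map (fun i : Nat => (i : Int)) (List.range n)

theorem rangeI_nodup (n : Nat) : (rangeI n).Nodup := by
  unfold rangeI
  exact List.Nodup.map_on (fun x _ y _ h => by exact_mod_cast h) List.nodup_range

theorem mem_rangeI {n : Nat} {x : Int} : x ∈ rangeI n ↔ 0 ≤ x ∧ x < n := by
  simp [rangeI]; constructor
  · rintro ⟨i, hi, rfl⟩; omega
  · rintro ⟨h0, hn⟩; exact ⟨x.toNat, by omega, by omega⟩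

def pairsB (b : List Int) : List (Int × Int) :=
  (PySem.List.enumerate b 0).map (fun p => (p.2, (b.length : Int) - 1 - p.1))

theorem pairsB_eq (b : List Int) :
    pairsB b = (List.range b.length).map (fun i : Nat => (b.getD i 0, mir b.length (i : Int))) := by
  simp [pairsB, enum_eq, List.map_map, mir, Function.comp_def]

theorem rotB_eq (b : List Int) :
    rotB b = (PySem.List.sorted2 (pairsB b) Prod.fst Prod.snd false).map (fun p => p.2) := rfl

def idxI (b : List Int) (k : Int) : Int := (b.idxOf k : Int)

theorem rotB_of_perm (b : List Int) (hb : b.Perm (rangeI b.length)) :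
    rotB b = (rangeI b.length).map (fun k => mir b.length (idxI b k)) := by
  set n := b.length with hn
  have hnodup : b.Nodup := hb.symm.nodup (rangeI_nodup n)
  have hmem : ∀ k : Nat, k < n → (k : Int) ∈ b := fun k hk =>
    (hb.mem_iff).mpr (mem_rangeI.mpr ⟨by omega, by exact_mod_cast hk⟩)
  have hmem' : ∀ x ∈ b, 0 ≤ x ∧ x < (n : Int) := fun x hx =>
    mem_rangeI.mp ((hb.mem_iff).mp hx)
  set σ : Nat → Nat := fun k => b.idxOf ((k : Int)) with hσ
  have hσlt : ∀ k : Nat, k < n → σ k < n := fun k hk =>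
    List.idxOf_lt_length_of_mem (hmem k hk)
  have hgetσ : ∀ k : Nat, (hk : k < n) → b[σ k]'(hσlt k hk) = (k : Int) := fun k hk =>
    List.getElem_idxOf (hσlt k hk)
  have hidx_get : ∀ i : Nat, (hi : i < n) → b.idxOf (b[i]'hi) = i := fun i hi =>
    hnodup.idxOf_getElem i hi
  -- the index map is a permutation of range n
  have hσnodup : (List.map σ (List.range n)).Nodup := by
    refine List.Nodup.map_on ?_ List.nodup_range
    intro x hx y hy hxy
    have hx' := List.mem_range.mp hx
    have hy' := List.mem_range.mp hy
    have : (x : Int) = (y : Int) := by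
      rw [← hgetσ x hx', ← hgetσ y hy']
      exact getElem_congr_idx hxy
    exact_mod_cast this
  have perm1 : (List.range n).Perm (List.map σ (List.range n)) := by
    refine (List.perm_ext_iff_of_nodup List.nodup_range hσnodup).mpr (fun a => ?_)
    constructor
    · intro ha
      have ha' := List.mem_range.mp ha
      have hba := hmem' _ (List.getElem_mem (by omega : a < b.length))
      refine List.mem_map.mpr ⟨(b[a]'(by omega)).toNat, List.mem_range.mpr (by omega), ?_⟩
      have hcast : (((b[a]'(by omega)).toNat : Nat) : Int) = b[a]'(by omega) := by omega
      show b.idxOf _ = a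
      rw [hcast]
      exact hidx_get a ha'
    · intro ha
      obtain ⟨k, hk, rfl⟩ := List.mem_map.mp ha
      exact List.mem_range.mpr (hσlt k (List.mem_range.mp hk))
  -- the named sorted order
  set gp : Nat → Int × Int := fun i => (b.getD i 0, mir n (i : Int)) with hgp
  set ys : List (Int × Int) :=
    List.map (fun k : Nat => ((k : Int), mir n (idxI b (k : Int)))) (List.range n) with hys
  have hys_eq : ys = List.map gp (List.map σ (List.range n)) := by
    rw [List.map_map]
    refine List.map_congr_left (fun k hk => ?_)
    have hk' := List.mem_range.mp hk
    have h1 : b.getD (σ k) 0 = (k : Int) := by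
      rw [List.getD_eq_getElem b 0 (by exact hσlt k hk')]
      exact hgetσ k hk'
    simp only [Function.comp_apply, hgp]
    refine Prod.ext ?_ ?_
    · exact h1.symm
    · rfl
  have hperm2 : ys.Perm (pairsB b) := by
    rw [hys_eq, pairsB_eq]
    exact (perm1.map gp).symm
  have hpw : ys.Pairwise (fun a b => bef a b = true) := by
    rw [hys]
    refine List.Pairwise.map _ ?_ (List.pairwise_lt_range)
    intro a c hac
    rw [bef_iff]
    left
    show ((a : Int)) < ((c : Int))
    exact_mod_cast hac
  rw [rotB_eq, sorted2_fst_snd_eq (pairsB b) ys hperm2 hpw, hys, List.map_map]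
  show _ = List.map _ (List.map _ (List.range n))
  rw [List.map_map]
  rfl

theorem map_mir_perm (n : Nat) : (List.map (mir n) (rangeI n)).Perm (rangeI n) := by
  have hnd : (List.map (mir n) (rangeI n)).Nodup := by
    refine List.Nodup.map_on ?_ (rangeI_nodup n)
    intro x _ y _ hxy
    simp only [mir] at hxy; omega
  refine (List.perm_ext_iff_of_nodup hnd (rangeI_nodup n)).mpr (fun a => ?_)
  constructor
  · intro ha
    obtain ⟨x, hx, rfl⟩ := List.mem_map.mp ha
    have := mem_rangeI.mp hx
    exact mem_rangeI.mpr (by simp only [mir]; omega)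
  · intro ha
    have := mem_rangeI.mp ha
    refine List.mem_map.mpr ⟨(n : Int) - 1 - a, mem_rangeI.mpr (by omega), ?_⟩
    simp only [mir]; omega

theorem rangeI_getElem (n : Nat) (j : Nat) (hj : j < n) :
    (rangeI n)[j]'(by simpa [rangeI] using hj) = (j : Int) := by
  simp [rangeI]

theorem rotB_perm_range (b : List Int) : (rotB b).Perm (rangeI b.length) := by
  set n := b.length with hn
  have h1 : (rotB b).Perm (List.map (fun p : Int × Int => p.2) (pairsB b)) := by
    rw [rotB_eq]
    exact (PySem.List.sorted2_perm _ _ _ _).map _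
  have h2 : List.map (fun p : Int × Int => p.2) (pairsB b) = List.map (mir n) (rangeI n) := by
    rw [pairsB_eq, List.map_map]
    unfold rangeI
    rw [List.map_map]
    rfl
  rw [h2] at h1
  exact h1.trans (map_mir_perm n)

theorem rotB_length (b : List Int) : (rotB b).length = b.length := by
  have := (rotB_perm_range b).length_eq; simpa [rangeI] using this

theorem rotB_rotB (b : List Int) (hb : b.Perm (rangeI b.length)) :
    rotB (rotB b) = (b.reverse).map (mir b.length) := by
  set n := b.length with hn
  have hnodup : b.Nodup := hb.symm.nodup (rangeI_nodup n)
  have hmem' : ∀ x ∈ b, 0 ≤ x ∧ x < (n : Int) := fun x hx =>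
    mem_rangeI.mp ((hb.mem_iff).mp hx)
  have hidx_get : ∀ i : Nat, (hi : i < n) → b.idxOf (b[i]'hi) = i := fun i hi =>
    hnodup.idxOf_getElem i hi
  set cB := rotB b with hc
  have hclen : cB.length = n := rotB_length b
  have hcform : cB = (rangeI n).map (fun k => mir n (idxI b k)) := rotB_of_perm b hb
  have hcnodup : cB.Nodup := by
    have := rotB_perm_range b
    exact this.symm.nodup (rangeI_nodup n)
  have hcperm : cB.Perm (rangeI cB.length) := by rw [hclen]; exact rotB_perm_range b
  have hform := rotB_of_perm cB hcperm
  rw [hclen] at hform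
  have hidxc : ∀ k : Nat, (hk : k < n) → idxI cB ((k : Int)) = b[n - 1 - k]'(by omega) := by
    intro k hk
    have hbm := hmem' _ (List.getElem_mem (by omega : n - 1 - k < b.length))
    set p : Nat := (b[n - 1 - k]'(by omega)).toNat with hpdef
    have hpcast : (p : Int) = b[n - 1 - k]'(by omega) := by omega
    have hplt : p < n := by omega
    have hplt' : p < cB.length := by omega
    have hpr : p < (rangeI n).length := by simpa [rangeI] using hplt
    have hcp : cB[p] = (k : Int) := by
      have h1 : cB[p] = mir n (idxI b ((rangeI n)[p])) := by
        rw [getElem_congr_coll hcform]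
        exact List.getElem_map _
      rw [rangeI_getElem n p hplt, hpcast] at h1
      rw [h1]
      unfold idxI
      rw [hidx_get (n - 1 - k) (by omega)]
      simp only [mir]
      omega
    unfold idxI
    rw [← hpcast, ← hcp]
    rw [hcnodup.idxOf_getElem p (by omega)]
  refine List.ext_getElem ?_ ?_
  · rw [hform]; simp [rangeI]
    exact hn
  · intro j hj1 hj2
    have hjn : j < n := by
      have := hj1; rw [hform] at this; simpa [rangeI] using this
    have h1 : (rotB cB)[j]'hj1 = mir n (idxI cB ((j : Int))) := by
      have hje : j < (List.map (fun k => mir n (idxI cB k)) (rangeI n)).length := by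
        simpa [rangeI] using hjn
      have h2 : (rotB cB)[j]'hj1 = (List.map (fun k => mir n (idxI cB k)) (rangeI n))[j]'hje :=
        getElem_congr_coll hform
      rw [h2, List.getElem_map _, rangeI_getElem n j hjn]
    rw [h1, hidxc j hjn]
    rw [List.getElem_map (mir n), List.getElem_reverse]

theorem rotB4 (b : List Int) (hb : b.Perm (rangeI b.length)) :
    rotB (rotB (rotB (rotB b))) = b := by
  set n := b.length with hn
  have hmem' : ∀ x ∈ b, 0 ≤ x ∧ x < (n : Int) := fun x hx =>
    mem_rangeI.mp ((hb.mem_iff).mp hx)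
  have h2 := rotB_rotB b hb
  set c2 := (b.reverse).map (mir n) with hc2
  have hc2len : c2.length = n := by simp [hc2, hn]
  have hc2perm : c2.Perm (rangeI c2.length) := by
    rw [hc2len]
    have hrev : (b.reverse).Perm (rangeI n) := (List.reverse_perm b).trans hb
    exact (hrev.map (mir n)).trans (map_mir_perm n)
  have h4 : rotB (rotB c2) = (c2.reverse).map (mir c2.length) := rotB_rotB c2 hc2perm
  rw [hc2len] at h4
  have hcomp : List.map (mir n ∘ mir n) b = List.map id b :=
    List.map_congr_left (fun x hx => by
      have := hmem' x hx; simp only [Function.comp_apply, mir, id]; omega)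
  rw [h2, h4, hc2, ← List.map_reverse, List.reverse_reverse, List.map_map, hcomp, List.map_id]

theorem stepA_eq (bd : List Int) : rotateStepA bd = rotB bd := by
  have h1 : (PySem.List.enumerate bd 0).foldl
      (fun (s : List Int × List Int) p => (s.1 ++ [p.2], s.2 ++ [p.1])) ([], [])
      = (bd, PySem.List.pyRange 0 (bd.length : Int) 1) := by
    rw [PySem.List.foldl_prod_mk (fun (acc : List Int) (p : Int × Int) => acc ++ [p.2])
        (fun (acc : List Int) (p : Int × Int) => acc ++ [p.1]) (PySem.List.enumerate bd 0) [] []]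
    rw [PySem.List.foldl_append_singleton_eq_map, PySem.List.foldl_append_singleton_eq_map]
    simp only [List.nil_append, PySem.List.map_snd_enumerate, PySem.List.map_fst_enumerate,
      zero_add]
  unfold rotateStepA rotB
  simp only [h1, PySem.List.foldl_append_singleton, PySem.List.foldl_append_singleton_eq_map,
    List.nil_append]
  congr 1
  congr 1
  refine List.map_congr_left (fun p hp => ?_)
  have hp1 : p.1 ∈ PySem.List.pyRange 0 (bd.length : Int) 1 := by
    have hfst := PySem.List.map_fst_enumerate bd 0
    rw [zero_add] at hfst
    rw [← hfst]
    exact List.mem_map.mpr ⟨p, hp, rfl⟩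
  have hb := (PySem.List.mem_pyRange_one).mp hp1
  have hlen : ((PySem.List.pyRange 0 (bd.length : Int) 1).reverse).length = bd.length := by
    simp [PySem.List.length_pyRange_one]
  have h0 : p.1 < (((PySem.List.pyRange 0 (bd.length : Int) 1).reverse).length : Int) := by
    rw [hlen]; omega
  rw [PySem.List.pyGetD_eq_getElem _ _ hb.1 h0]
  rw [List.getElem_reverse]
  rw [PySem.List.getElem_pyRange_one]
  refine Prod.ext rfl ?_
  show (0 : Int) + ((PySem.List.pyRange 0 (bd.length : Int) 1).length - 1 - p.1.toNat : Nat) = _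
  rw [PySem.List.length_pyRange_one]
  omega

theorem goA_add (a c : Nat) (x : List Int) :
    rotateGoA (a + c) x = rotateGoA a (rotateGoA c x) := by
  induction c generalizing x with
  | zero => rfl
  | succ c ih =>
      have : a + (c + 1) = (a + c) + 1 := by omega
      rw [this]
      show rotateGoA (a + c) (rotateStepA x) = _
      rw [ih (rotateStepA x)]; rfl

set_option maxHeartbeats 1000000 in
theorem goA_mod (s : Nat) (b : List Int) (hb : b.Perm (rangeI b.length)) :
    rotateGoA s b = rotateGoA (s % 4) b := by
  induction s using Nat.strong_induction_on with
  | _ s ih =>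
    by_cases hs : s < 4
    · rw [Nat.mod_eq_of_lt hs]
    · have hgo : ∀ (m : Nat) (x : List Int), rotateGoA (m + 1) x = rotateGoA m (rotateStepA x) :=
        fun m x => rfl
      have hstep4 : rotateGoA 4 b = rotB (rotB (rotB (rotB b))) := by
        rw [show (4 : Nat) = 3 + 1 from rfl, hgo, show (3 : Nat) = 2 + 1 from rfl, hgo,
          show (2 : Nat) = 1 + 1 from rfl, hgo, show (1 : Nat) = 0 + 1 from rfl, hgo]
        show rotateStepA (rotateStepA (rotateStepA (rotateStepA b))) = _
        rw [stepA_eq, stepA_eq, stepA_eq, stepA_eq]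
      have h4 : s = (s - 4) + 4 := by omega
      rw [h4]
      rw [goA_add (s - 4) 4 b]
      rw [hstep4]
      rw [rotB4 b hb]
      rw [ih (s - 4) (by omega)]
      have hmod : (s - 4) % 4 = ((s - 4) + 4) % 4 := by omega
      rw [hmod]

theorem foldl_rotB (l : List Int) (x : List Int) :
    l.foldl (fun acc _ => rotB acc) x = rotateGoA l.length x := by
  induction l generalizing x with
  | nil => rfl
  | cons a l ih =>
      show List.foldl _ (rotB x) l = rotateGoA (l.length + 1) x
      rw [ih (rotB x)]
      show rotateGoA l.length (rotB x) = rotateGoA l.length (rotateStepA x)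
      rw [stepA_eq]

-- ===== VERDICT (by name: the statement is the Claim_ definition above) =====
theorem rotate_spec : Claim_equal_rotate := by
  intro bd times _ hpre
  unfold Pre_rotate at hpre
  unfold Spec_rotate rotate rotate_alt
  rw [if_neg (by omega)]
  rw [foldl_rotB, PySem.List.length_pyRange_one]
  have htn : times.toNat = (times.toNat - 1) + 1 := by omega
  rw [htn]
  show rotateGoA (times.toNat - 1) (rotateStepA bd) = _
  rw [stepA_eq]
  have hperm : (rotB bd).Perm (rangeI (rotB bd).length) := by
    rw [rotB_length]; exact rotB_perm_range bd
  rw [goA_mod _ _ hperm]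
  have hr : PySem.Int.mod (times - 1) 4 = (times - 1) % 4 :=
    PySem.Int.mod_eq_emod_of_pos (by norm_num)
  have hmod : (times.toNat - 1) % 4 = (PySem.Int.mod (times - 1) 4 - 0).toNat := by
    rw [hr]; omega
  rw [hmod]
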